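-- pv_equiv track=rewrite | github.com/Hahet/asm_vm | x16asm.py | valid_list
-- ===== SOURCE A (Python) =====
-- def not_empty(s):
--     return s and s.strip()
--
-- def valid_list(array):
--     r = []
--     for l in array:
--         index = l.find(';')
--         if index != -1:
--             x = l[0:index]
--             r.append(x.strip())
--         else:
--             r.append(l.strip())
--
--     array2 = list(filter(not_empty, r))
--     r2 = []
--     for l in array2:
--         index = l.find('#')
--         if index != -1:
--             x = l[0:index]
--             r2.append(x.strip())
--         else:
--             r2.append(l.strip())
--
--     result2 = list(filter(not_empty, r2))
--
--     return result2
-- ===== SOURCE B (Python) =====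
-- def valid_list(array):
--     result = []
--     for l in array:
--         i = l.find(';')
--         j = l.find('#')
--         if i == -1:
--             cut = j
--         elif j == -1:
--             cut = i
--         else:
--             cut = min(i, j)
--         s = (l if cut == -1 else l[0:cut]).strip()
--         if s:
--             result.append(s)
--     return result
-- ===== Notes on version B (the rewrite author's own statement) =====
-- stated objective: simpler
-- what changed: B replaces A's two sequential cut-and-append loops with two intermediate filtered lists by a single pass that cuts each line at the earliest of the first ';' and first '#', strips once, and appends only non-empty results directly.
import Mathlib
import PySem

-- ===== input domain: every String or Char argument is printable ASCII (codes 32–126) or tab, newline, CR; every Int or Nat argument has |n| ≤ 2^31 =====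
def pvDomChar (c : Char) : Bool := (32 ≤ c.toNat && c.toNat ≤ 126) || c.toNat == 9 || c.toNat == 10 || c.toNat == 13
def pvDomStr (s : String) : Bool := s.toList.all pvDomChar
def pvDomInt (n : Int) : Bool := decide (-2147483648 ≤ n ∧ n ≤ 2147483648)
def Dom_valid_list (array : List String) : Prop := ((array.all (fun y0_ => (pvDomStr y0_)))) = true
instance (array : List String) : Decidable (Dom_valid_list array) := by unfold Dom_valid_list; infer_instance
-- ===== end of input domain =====

-- B simplifies A: one pass cutting each line at the earliest ';'/'#', strip once, append if non-empty,
-- instead of A's two cut loops with two intermediate filtered lists. Equal return value on all inputs.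

-- ===== PORT A =====
-- Python truthiness of not_empty(s) = (s and s.strip()): kept in filter iff s non-empty and s.strip() non-empty
def not_empty (s : String) : Bool := decide (s ≠ "") && decide (PySem.Str.strip s ≠ "")

def valid_list (array : List String) : List String :=
  let r := array.foldl (fun r l =>
    let index := PySem.Str.find l ";"
    if index ≠ -1 then
      let x := PySem.Str.slice l (some 0) (some index)
      r ++ [PySem.Str.strip x]
    else
      r ++ [PySem.Str.strip l]) []
  let array2 := r.filter not_empty
  let r2 := array2.foldl (fun r2 l =>
    let index := PySem.Str.find l "#"
    if index ≠ -1 then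
      let x := PySem.Str.slice l (some 0) (some index)
      r2 ++ [PySem.Str.strip x]
    else
      r2 ++ [PySem.Str.strip l]) []
  r2.filter not_empty

-- ===== PORT B =====
def valid_list_alt (array : List String) : List String :=
  array.foldl (fun acc l =>
    let i := PySem.Str.find l ";"
    let j := PySem.Str.find l "#"
    let cut := if i = -1 then j else if j = -1 then i else min i j
    let s := if cut = -1 then PySem.Str.strip l
             else PySem.Str.strip (PySem.Str.slice l (some 0) (some cut))
    if s ≠ "" then acc ++ [s] else acc) []

-- ===== PRECONDITION & SPEC =====
def Spec_valid_list (array : List String) (out : List String) : Prop := out = valid_list_alt array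
instance (array : List String) (out : List String) : Decidable (Spec_valid_list array out) := by unfold Spec_valid_list; infer_instance

-- ===== CLAIM (what is proved, stated in full; the proofs are below) =====
def Claim_equal_valid_list : Prop := ∀ (array : List String), Dom_valid_list array → Spec_valid_list array (valid_list array)

-- ===== LEMMAS AND PROOFS =====

-- per-line function of A's two cutting loops (d = the delimiter string)
def pvStage (d : String) (l : String) : String :=
  if PySem.Str.find l d ≠ -1 then
    PySem.Str.strip (PySem.Str.slice l (some 0) (some (PySem.Str.find l d)))
  else PySem.Str.strip l

-- per-line function of B's single loop
def pvB (l : String) : String :=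
  let i := PySem.Str.find l ";"
  let j := PySem.Str.find l "#"
  let cut := if i = -1 then j else if j = -1 then i else min i j
  if cut = -1 then PySem.Str.strip l
  else PySem.Str.strip (PySem.Str.slice l (some 0) (some cut))

-- index of the first occurrence of c in cs, cs.length if absent
def pvIdx (c : Char) (cs : List Char) : Nat :=
  if PySem.Chars.find cs [c] = -1 then cs.length else (PySem.Chars.find cs [c]).toNat

theorem pvIdx_le (c : Char) (cs : List Char) : pvIdx c cs ≤ cs.length := by
  unfold pvIdx
  split
  · exact le_rfl
  · have h1 := PySem.Chars.find_le_length cs [c]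
    omega

theorem pv_singleton_prefix_iff (c : Char) (l : List Char) : [c] <+: l ↔ l.head? = some c := by
  constructor
  · rintro ⟨t, rfl⟩; rfl
  · intro h2
    cases l with
    | nil => simp at h2
    | cons a t => simp at h2; subst h2; exact ⟨t, rfl⟩

theorem pvIdx_ne (c : Char) (cs : List Char) (k : Nat) (hk : k < pvIdx c cs) (hl : k < cs.length) :
    cs[k] ≠ c := by
  by_cases hf : PySem.Chars.find cs [c] = -1
  · have hmem : c ∉ cs := fun hc =>
      ((PySem.Chars.find_eq_neg_one_iff cs [c]).mp hf) ((List.singleton_infix_iff c cs).mpr hc)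
    intro he; exact hmem (he ▸ cs.getElem_mem hl)
  · have h0 : 0 ≤ PySem.Chars.find cs [c] := by
      have := PySem.Chars.neg_one_le_find cs [c]; omega
    have hk' : k < (PySem.Chars.find cs [c]).toNat := by
      unfold pvIdx at hk; rw [if_neg hf] at hk; exact hk
    have hsp := (PySem.Chars.find_spec h0).2 k hk'
    intro he
    exact hsp ((pv_singleton_prefix_iff c (cs.drop k)).mpr
      (by rw [List.head?_drop, List.getElem?_eq_getElem hl, he]))

theorem pvIdx_get (c : Char) (cs : List Char) (h : pvIdx c cs < cs.length) :
    cs[pvIdx c cs] = c := by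
  by_cases hf : PySem.Chars.find cs [c] = -1
  · unfold pvIdx at h; rw [if_pos hf] at h; omega
  · have h0 : 0 ≤ PySem.Chars.find cs [c] := by
      have := PySem.Chars.neg_one_le_find cs [c]; omega
    have hsp := (PySem.Chars.find_spec h0).1
    have h2 := (pv_singleton_prefix_iff c _).mp hsp
    rw [List.head?_drop] at h2
    rw [List.getElem_eq_iff h]
    unfold pvIdx
    rw [if_neg hf]
    unfold pvIdx at h
    rw [if_neg hf] at h
    exact h2

-- takeWhile as take at the first failing index
theorem pvIdx_eq_length (c : Char) (x : List Char) (h : PySem.Chars.find x [c] = -1) :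
    pvIdx c x = x.length := by
  unfold pvIdx; rw [if_pos h]

theorem pv_takeWhile_eq_take {α : Type} (p : α → Bool) (l : List α) (n : Nat)
    (hn : n ≤ l.length)
    (h1 : ∀ k, (hk : k < n) → (hl : k < l.length) → p l[k] = true)
    (h2 : (h : n < l.length) → p l[n] = false) :
    l.takeWhile p = l.take n := by
  induction l generalizing n with
  | nil => simp
  | cons a t ih =>
    cases n with
    | zero =>
      have hpa : p a = false := by simpa using h2 (by simp)
      simp [hpa]
    | succ m =>
      have hpa : p a = true := h1 0 (Nat.succ_pos m) (by simp)
      simp only [List.takeWhile_cons, hpa, if_true, List.take_succ_cons]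
      rw [ih m (by simpa using hn)
        (fun k hk hl => h1 (k+1) (by omega) (by simpa using Nat.succ_lt_succ hl))
        (fun h => h2 (by simpa using Nat.succ_lt_succ h))]

theorem pv_take_pvIdx_eq_takeWhile (c : Char) (cs : List Char) :
    cs.takeWhile (fun a => !(a == c)) = cs.take (pvIdx c cs) := by
  apply pv_takeWhile_eq_take _ _ _ (pvIdx_le c cs)
  · intro k hk hl
    simpa using pvIdx_ne c cs k hk hl
  · intro h
    simp [pvIdx_get c cs h]

-- whitespace lemmas about strip
theorem pv_dropWhile_eq_nil {α : Type} (p : α → Bool) (t : List α) (h : ∀ x ∈ t, p x = true) :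
    t.dropWhile p = [] := by
  induction t with
  | nil => rfl
  | cons a s ih =>
    rw [List.dropWhile_cons_of_pos (h a (by simp))]
    exact ih (fun x hx => h x (by simp [hx]))

theorem pv_strip_append_ws (u t : List Char) (h : ∀ x ∈ t, PySem.Chars.isspace x = true) :
    PySem.Chars.strip (u ++ t) = PySem.Chars.strip u := by
  unfold PySem.Chars.strip PySem.Chars.lstrip PySem.Chars.rstrip
  rw [List.dropWhile_append]
  split
  · rename_i he
    rw [pv_dropWhile_eq_nil _ t h]
    simp only [List.isEmpty_iff] at he
    rw [he]
  · rename_i he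
    congr 1
    rw [List.reverse_append, List.dropWhile_append]
    have : (List.dropWhile PySem.Chars.isspace t.reverse).isEmpty = true := by
      rw [pv_dropWhile_eq_nil _ t.reverse (fun x hx => h x (List.mem_reverse.mp hx))]; rfl
    simp [this]

theorem pv_strip_cons_ws (a : Char) (x : List Char) (h : PySem.Chars.isspace a = true) :
    PySem.Chars.strip (a :: x) = PySem.Chars.strip x := by
  unfold PySem.Chars.strip PySem.Chars.lstrip
  rw [List.dropWhile_cons_of_pos h]

theorem pv_strip_takeWhile_lstrip (p : Char → Bool) (x : List Char)
    (hw : ∀ a, PySem.Chars.isspace a = true → p a = true) :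
    PySem.Chars.strip ((PySem.Chars.lstrip x).takeWhile p) = PySem.Chars.strip (x.takeWhile p) := by
  induction x with
  | nil => rfl
  | cons a t ih =>
    by_cases h : PySem.Chars.isspace a = true
    · unfold PySem.Chars.lstrip at *
      rw [List.dropWhile_cons_of_pos h, List.takeWhile_cons_of_pos (hw a h),
        pv_strip_cons_ws a _ h]
      exact ih
    · unfold PySem.Chars.lstrip
      rw [List.dropWhile_cons_of_neg (by simpa using h)]

theorem pv_rstrip_decomp (x : List Char) :
    x = PySem.Chars.rstrip x ++ (x.reverse.takeWhile PySem.Chars.isspace).reverse ∧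
    ∀ a ∈ (x.reverse.takeWhile PySem.Chars.isspace).reverse, PySem.Chars.isspace a = true := by
  constructor
  · unfold PySem.Chars.rstrip
    conv_lhs => rw [← x.reverse_reverse, ← List.takeWhile_append_dropWhile (p := PySem.Chars.isspace) (l := x.reverse)]
    rw [List.reverse_append]
  · intro a ha
    exact List.mem_takeWhile_imp (List.mem_reverse.mp ha)

theorem pv_strip_takeWhile_rstrip (p : Char → Bool) (x : List Char) :
    PySem.Chars.strip ((PySem.Chars.rstrip x).takeWhile p) = PySem.Chars.strip (x.takeWhile p) := by
  obtain ⟨hx, ht⟩ := pv_rstrip_decomp x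
  conv_rhs => rw [hx]
  rw [List.takeWhile_append]
  split
  · rename_i hlen
    have heq : (PySem.Chars.rstrip x).takeWhile p = PySem.Chars.rstrip x :=
      (List.takeWhile_prefix p).eq_of_length hlen
    rw [heq, pv_strip_append_ws _ _ (fun a ha => ht a ((List.takeWhile_prefix p).subset ha))]
  · rfl

theorem pv_strip_takeWhile_strip (p : Char → Bool) (x : List Char)
    (hw : ∀ a, PySem.Chars.isspace a = true → p a = true) :
    PySem.Chars.strip ((PySem.Chars.strip x).takeWhile p) = PySem.Chars.strip (x.takeWhile p) := by
  show PySem.Chars.strip ((PySem.Chars.rstrip (PySem.Chars.lstrip x)).takeWhile p) = _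
  rw [pv_strip_takeWhile_rstrip p _, pv_strip_takeWhile_lstrip p x hw]

theorem pv_strip_strip (x : List Char) :
    PySem.Chars.strip (PySem.Chars.strip x) = PySem.Chars.strip x := by
  have h := pv_strip_takeWhile_strip (fun _ => true) x (fun _ _ => rfl)
  have ht : ∀ (y : List Char), List.takeWhile (fun _ => true) y = y :=
    fun y => List.takeWhile_eq_self_iff.mpr (by simp)
  rwa [ht, ht] at h

theorem pv_mem_of_mem_strip (a : Char) (x : List Char) (h : a ∈ PySem.Chars.strip x) : a ∈ x := by
  unfold PySem.Chars.strip PySem.Chars.rstrip PySem.Chars.lstrip at h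
  have h1 := (List.dropWhile_suffix (l := (List.dropWhile PySem.Chars.isspace x).reverse) PySem.Chars.isspace).subset (List.mem_reverse.mp h)
  have h2 := (List.dropWhile_suffix (l := x) PySem.Chars.isspace).subset (List.mem_reverse.mp h1)
  exact h2

-- the core per-line fact: cutting at '#' after A's first stage equals cutting at the earlier delimiter
theorem pv_core (cs : List Char) :
    PySem.Chars.strip ((PySem.Chars.strip (cs.take (pvIdx ';' cs))).take
      (pvIdx '#' (PySem.Chars.strip (cs.take (pvIdx ';' cs))))) =
    PySem.Chars.strip (cs.take (min (pvIdx ';' cs) (pvIdx '#' cs))) := by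
  by_cases h : pvIdx ';' cs ≤ pvIdx '#' cs
  · have hmin : min (pvIdx ';' cs) (pvIdx '#' cs) = pvIdx ';' cs := by omega
    have hnotin : '#' ∉ PySem.Chars.strip (cs.take (pvIdx ';' cs)) := by
      intro hc
      have hmem := pv_mem_of_mem_strip _ _ hc
      obtain ⟨k, hk, he⟩ := List.mem_iff_getElem.mp hmem
      rw [List.length_take] at hk
      rw [List.getElem_take] at he
      exact pvIdx_ne '#' cs k (by omega) (by omega) he
    have hfind : PySem.Chars.find (PySem.Chars.strip (cs.take (pvIdx ';' cs))) ['#'] = -1 := by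
      rw [PySem.Chars.find_eq_neg_one_iff]
      intro hinf
      exact hnotin ((List.singleton_infix_iff '#' _).mp hinf)
    have hidx := pvIdx_eq_length '#' _ hfind
    rw [hidx, List.take_length, hmin, pv_strip_strip]
  · have hmin : min (pvIdx ';' cs) (pvIdx '#' cs) = pvIdx '#' cs := by omega
    have hlen : pvIdx ';' cs ≤ cs.length := pvIdx_le ';' cs
    have hi2lt : pvIdx '#' cs < cs.length := by omega
    rw [← pv_take_pvIdx_eq_takeWhile '#' (PySem.Chars.strip (cs.take (pvIdx ';' cs))),
      pv_strip_takeWhile_strip _ _ (fun a ha => by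
        simp only [Bool.not_eq_eq_eq_not, Bool.not_true, beq_eq_false_iff_ne]
        intro he; subst he; simp [PySem.Chars.isspace] at ha)]
    have htw : (cs.take (pvIdx ';' cs)).takeWhile (fun a => !(a == '#')) =
        (cs.take (pvIdx ';' cs)).take (pvIdx '#' cs) := by
      apply pv_takeWhile_eq_take _ _ _ (by rw [List.length_take]; omega)
      · intro k hk hl
        rw [List.length_take] at hl
        rw [List.getElem_take]
        simpa using pvIdx_ne '#' cs k (by omega) (by omega)
      · intro hlt
        rw [List.getElem_take]
        simp [pvIdx_get '#' cs hi2lt]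
    rw [htw, List.take_take, hmin]
    have hmm : min (pvIdx '#' cs) (pvIdx ';' cs) = pvIdx '#' cs := by omega
    rw [hmm]

-- string-level per-line forms
theorem pvStage_toList (d : String) (c : Char) (hd : d.toList = [c]) (l : String) :
    (pvStage d l).toList = PySem.Chars.strip (l.toList.take (pvIdx c l.toList)) := by
  unfold pvStage
  have hfind : PySem.Str.find l d = PySem.Chars.find l.toList [c] := by
    simp [PySem.Str.find, hd]
  split
  · rename_i h
    rw [hfind] at h
    have h0 : 0 ≤ PySem.Chars.find l.toList [c] := by
      have := PySem.Chars.neg_one_le_find l.toList [c]; omega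
    rw [PySem.Str.toList_strip]
    congr 1
    rw [PySem.Str.toList_slice, hfind]
    simp only [PySem.Chars.slice_eq_listSlice, PySem.List.slice_zero_start]
    rw [PySem.List.slice_to _ h0]
    unfold pvIdx
    rw [if_neg h]
  · rename_i h
    rw [hfind] at h
    rw [ne_eq, not_not] at h
    rw [PySem.Str.toList_strip]
    unfold pvIdx
    rw [if_pos h, List.take_length]

theorem pvB_toList (l : String) :
    (pvB l).toList =
      PySem.Chars.strip (l.toList.take (min (pvIdx ';' l.toList) (pvIdx '#' l.toList))) := by
  unfold pvB
  have hi : PySem.Str.find l ";" = PySem.Chars.find l.toList [';'] := by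
    simp [PySem.Str.find]
  have hj : PySem.Str.find l "#" = PySem.Chars.find l.toList ['#'] := by
    simp [PySem.Str.find]
  have hbi := PySem.Chars.neg_one_le_find l.toList [';']
  have hbj := PySem.Chars.neg_one_le_find l.toList ['#']
  have hli := PySem.Chars.find_le_length l.toList [';']
  have hlj := PySem.Chars.find_le_length l.toList ['#']
  simp only [hi, hj]
  unfold pvIdx
  by_cases h1 : PySem.Chars.find l.toList [';'] = -1
  · by_cases h2 : PySem.Chars.find l.toList ['#'] = -1
    · simp only [if_pos h1, if_pos h2, min_self, List.take_length, PySem.Str.toList_strip]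
    · simp only [if_pos h1, if_neg h2, PySem.Str.toList_strip]
      congr 1
      rw [PySem.Str.toList_slice]
      simp only [PySem.Chars.slice_eq_listSlice, PySem.List.slice_zero_start]
      rw [PySem.List.slice_to _ (by omega)]
      congr 1
      omega
  · by_cases h2 : PySem.Chars.find l.toList ['#'] = -1
    · simp only [if_neg h1, if_pos h2, PySem.Str.toList_strip]
      congr 1
      rw [PySem.Str.toList_slice]
      simp only [PySem.Chars.slice_eq_listSlice, PySem.List.slice_zero_start]
      rw [PySem.List.slice_to _ (by omega)]
      congr 1
      omega
    · simp only [if_neg h1, if_neg h2]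
      rw [if_neg (show ¬ min (PySem.Chars.find l.toList [';']) (PySem.Chars.find l.toList ['#']) = -1 by omega)]
      rw [PySem.Str.toList_strip]
      congr 1
      rw [PySem.Str.toList_slice]
      simp only [PySem.Chars.slice_eq_listSlice, PySem.List.slice_zero_start]
      rw [PySem.List.slice_to _ (by omega)]
      congr 1
      omega

theorem pv_stage_stage_eq_pvB (l : String) : pvStage "#" (pvStage ";" l) = pvB l := by
  apply String.toList_inj.mp
  rw [pvStage_toList "#" '#' rfl, pvB_toList, pvStage_toList ";" ';' rfl]
  exact pv_core l.toList

theorem pv_strip_stage (d : String) (c : Char) (hd : d.toList = [c]) (l : String) :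
    PySem.Str.strip (pvStage d l) = pvStage d l := by
  apply String.toList_inj.mp
  rw [PySem.Str.toList_strip, pvStage_toList d c hd, pv_strip_strip]

theorem pv_not_empty_stage (d : String) (c : Char) (hd : d.toList = [c]) (l : String) :
    not_empty (pvStage d l) = decide (pvStage d l ≠ "") := by
  unfold not_empty
  rw [pv_strip_stage d c hd]
  cases h : decide (pvStage d l ≠ "") <;> simp_all

theorem pv_strip_pvB (l : String) : PySem.Str.strip (pvB l) = pvB l := by
  rw [← pv_stage_stage_eq_pvB l]
  exact pv_strip_stage "#" '#' rfl _

theorem pv_not_empty_pvB (l : String) : not_empty (pvB l) = decide (pvB l ≠ "") := by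
  unfold not_empty
  rw [pv_strip_pvB]
  cases h : decide (pvB l ≠ "") <;> simp_all

theorem pv_stage_empty (l : String) (h : pvStage ";" l = "") : pvB l = "" := by
  rw [← pv_stage_stage_eq_pvB, h]
  rfl

-- fold-shape lemmas: A is map/filter/map/filter, B is filter-then-map
theorem pv_A_shape (array : List String) :
    valid_list array =
      (((array.map (pvStage ";")).filter not_empty).map (pvStage "#")).filter not_empty := by
  show (((array.foldl (fun r l =>
      if PySem.Str.find l ";" ≠ -1 then
        r ++ [PySem.Str.strip (PySem.Str.slice l (some 0) (some (PySem.Str.find l ";")))]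
      else r ++ [PySem.Str.strip l]) []).filter not_empty).foldl (fun r2 l =>
      if PySem.Str.find l "#" ≠ -1 then
        r2 ++ [PySem.Str.strip (PySem.Str.slice l (some 0) (some (PySem.Str.find l "#")))]
      else r2 ++ [PySem.Str.strip l]) []).filter not_empty = _
  have hf1 : (fun (r : List String) (l : String) =>
      if PySem.Str.find l ";" ≠ -1 then
        r ++ [PySem.Str.strip (PySem.Str.slice l (some 0) (some (PySem.Str.find l ";")))]
      else r ++ [PySem.Str.strip l]) = fun r l => r ++ [pvStage ";" l] := by
    funext r l
    unfold pvStage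
    split <;> rfl
  have hf2 : (fun (r2 : List String) (l : String) =>
      if PySem.Str.find l "#" ≠ -1 then
        r2 ++ [PySem.Str.strip (PySem.Str.slice l (some 0) (some (PySem.Str.find l "#")))]
      else r2 ++ [PySem.Str.strip l]) = fun r2 l => r2 ++ [pvStage "#" l] := by
    funext r2 l
    unfold pvStage
    split <;> rfl
  rw [hf1, PySem.List.foldl_append_singleton_eq_map, List.nil_append,
    hf2, PySem.List.foldl_append_singleton_eq_map, List.nil_append]

theorem pv_B_shape (array : List String) :
    valid_list_alt array = (array.filter (fun l => decide (pvB l ≠ ""))).map pvB := by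
  show array.foldl (fun acc l => if pvB l ≠ "" then acc ++ [pvB l] else acc) [] = _
  rw [PySem.List.foldl_append_ite (p := fun l => pvB l ≠ "") (f := pvB), List.nil_append]

theorem pv_main (xs : List String) :
    (((xs.map (pvStage ";")).filter not_empty).map (pvStage "#")).filter not_empty =
      (xs.filter (fun l => decide (pvB l ≠ ""))).map pvB := by
  induction xs with
  | nil => rfl
  | cons l t ih =>
    by_cases h1 : pvStage ";" l = ""
    · rw [List.map_cons,
        List.filter_cons_of_neg (by simp [not_empty, h1]),
        List.filter_cons_of_neg (by simp [pv_stage_empty l h1]), ih]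
    · rw [List.map_cons,
        List.filter_cons_of_pos (by simp [pv_not_empty_stage ";" ';' rfl, h1]),
        List.map_cons]
      by_cases h2 : pvB l = ""
      · rw [List.filter_cons_of_neg
          (by rw [pv_stage_stage_eq_pvB, pv_not_empty_pvB]; simp [h2]),
          List.filter_cons_of_neg (by simp [h2]), ih]
      · rw [List.filter_cons_of_pos
          (by rw [pv_stage_stage_eq_pvB, pv_not_empty_pvB]; simp [h2]),
          List.filter_cons_of_pos (by simp [h2]),
          List.map_cons, ih, pv_stage_stage_eq_pvB]

-- ===== VERDICT (by name: the statement is the Claim_ definition above) =====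
theorem valid_list_spec : Claim_equal_valid_list := by
  intro array _
  show valid_list array = valid_list_alt array
  rw [pv_A_shape, pv_B_shape, pv_main]
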